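-- pv_equiv track=rewrite | github.com/H256/paperless-cortex | backend/app/services/hierarchical_summary.py | group_page_ranges
-- ===== SOURCE A (Python) =====
-- def group_page_ranges(pages: list[int], section_pages: int) -> list[tuple[int, int]]:
--     section_pages = max(1, int(section_pages))
--     sorted_pages = _sorted_unique_positive_pages(pages)
--     if not sorted_pages:
--         return []
--     ranges: list[tuple[int, int]] = []
--     for i in range(0, len(sorted_pages), section_pages):
--         chunk = sorted_pages[i : i + section_pages]
--         ranges.append((chunk[0], chunk[-1]))
--     return ranges
--
-- def _sorted_unique_positive_pages(pages: list[int]) -> list[int]: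
--     return sorted(set(int(page) for page in pages if int(page) > 0))
-- ===== SOURCE B (Python) =====
-- def group_page_ranges(pages: list[int], section_pages: int) -> list[tuple[int, int]]:
--     section_pages = max(1, int(section_pages))
--     sorted_pages = sorted({int(page) for page in pages if int(page) > 0})
--     ranges: list[tuple[int, int]] = []
--     count = 0
--     first = 0
--     last = 0
--     for page in sorted_pages:
--         if count == 0:
--             first = page
--         last = page
--         count += 1
--         if count == section_pages:
--             ranges.append((first, last))
--             count = 0
--     if count:
--         ranges.append((first, last))
--     return ranges
-- ===== Notes on version B (the rewrite author's own statement) =====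
-- stated objective: alternative
-- what changed: A steps over index windows with range(0, len, section_pages) and slices each chunk to read chunk[0]/chunk[-1]; B makes a single element-wise pass over the sorted unique pages carrying (first, last, count) chunk state, flushing a pair every section_pages elements and once more for a trailing partial chunk.
import Mathlib
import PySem

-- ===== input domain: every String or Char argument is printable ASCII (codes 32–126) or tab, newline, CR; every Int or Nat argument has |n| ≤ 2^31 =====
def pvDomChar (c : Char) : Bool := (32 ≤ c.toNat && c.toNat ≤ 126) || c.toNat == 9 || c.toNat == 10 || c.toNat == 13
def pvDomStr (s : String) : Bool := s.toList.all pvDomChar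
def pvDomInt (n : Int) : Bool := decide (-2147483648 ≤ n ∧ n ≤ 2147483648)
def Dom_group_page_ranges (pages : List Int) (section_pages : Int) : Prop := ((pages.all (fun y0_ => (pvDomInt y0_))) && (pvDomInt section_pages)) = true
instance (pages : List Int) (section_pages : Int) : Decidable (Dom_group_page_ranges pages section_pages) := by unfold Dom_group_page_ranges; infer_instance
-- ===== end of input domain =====

-- B replaces A's index-range-and-slice chunking by a single pass over the pages with a
-- running (first, last, count) chunk state flushed every section_pages elements (alternative
-- decomposition, same asymptotic cost).

-- ===== PORT A =====
-- Port of A: sorted(set(x for x in pages if x > 0)), then for i in range(0, len, sp): slice.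
-- Inside the loop the slice is never empty (i < len, sp ≥ 1), so chunk[0] / chunk[-1] never
-- raise and the `.getD 0` defaults are never used — the port is exact.
def group_page_ranges (pages : List Int) (section_pages : Int) : List (Int × Int) :=
  let sp := max 1 section_pages
  let sorted_pages := PySem.List.sorted (PySem.Set.ofList (pages.filter (fun p => 0 < p))) (fun x => x) false
  if sorted_pages = [] then []
  else
    (PySem.List.pyRange 0 (sorted_pages.length : Int) sp).foldl
      (fun ranges i =>
        let chunk := PySem.List.slice sorted_pages (some i) (some (i + sp))
        ranges ++ [((PySem.List.pyGet? chunk 0).getD 0, (PySem.List.pyGet? chunk (-1)).getD 0)])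
      []

-- ===== PORT B =====
-- Port of Source B: one fold over the sorted pages carrying (ranges, count, first, last),
-- flushing a chunk whenever count reaches sp, plus a final flush of the partial chunk.
def group_page_ranges_alt (pages : List Int) (section_pages : Int) : List (Int × Int) :=
  let sp := max 1 section_pages
  let sorted_pages := PySem.List.sorted (PySem.Set.ofList (pages.filter (fun p => 0 < p))) (fun x => x) false
  let st := sorted_pages.foldl
    (fun (st : List (Int × Int) × Int × Int × Int) page =>
      let first := if st.2.1 = 0 then page else st.2.2.1
      let last := page
      let count := st.2.1 + 1
      if count = sp then (st.1 ++ [(first, last)], 0, first, last)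
      else (st.1, count, first, last))
    ([], 0, 0, 0)
  if st.2.1 ≠ 0 then st.1 ++ [(st.2.2.1, st.2.2.2)] else st.1

-- ===== PRECONDITION & SPEC =====
def Spec_group_page_ranges (pages : List Int) (section_pages : Int) (out : List (Int × Int)) : Prop := out = group_page_ranges_alt pages section_pages
instance (pages : List Int) (section_pages : Int) (out : List (Int × Int)) : Decidable (Spec_group_page_ranges pages section_pages out) := by unfold Spec_group_page_ranges; infer_instance

-- ===== CLAIM (what is proved, stated in full; the proofs are below) =====
def Claim_equal_group_page_ranges : Prop := ∀ (pages : List Int) (section_pages : Int), Dom_group_page_ranges pages section_pages → Spec_group_page_ranges pages section_pages (group_page_ranges pages section_pages)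

-- ===== LEMMAS AND PROOFS =====

-- Common characterisation: chunk a list into pieces of size k0+1, each piece reported as
-- (head, last element of the piece).
def pvChunks (k0 : Nat) : List Int → List (Int × Int)
  | [] => []
  | a :: t => (a, ((t.take k0).getLast?).getD a) :: pvChunks k0 (t.drop k0)
  termination_by l => l.length
  decreasing_by simp

theorem pvChunks_nil (k0 : Nat) : pvChunks k0 [] = [] := by
  unfold pvChunks
  rfl

theorem pvChunks_cons (k0 : Nat) (a : Int) (t : List Int) :
    pvChunks k0 (a :: t) = (a, ((t.take k0).getLast?).getD a) :: pvChunks k0 (t.drop k0) := by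
  conv_lhs => unfold pvChunks

theorem pvRange_pos_nil (a b s : Int) (hs : 0 < s) (h : b ≤ a) :
    PySem.List.pyRange a b s = [] := by
  rw [PySem.List.pyRange_of_pos a b hs, if_neg (by omega)]
  simp

theorem pvRange_pos_cons (a b s : Int) (hs : 0 < s) (hab : a < b) :
    PySem.List.pyRange a b s = a :: PySem.List.pyRange (a + s) b s := by
  rw [PySem.List.pyRange_of_pos a b hs, PySem.List.pyRange_of_pos (a + s) b hs,
    if_pos hab]
  have hN : ((b - a + s - 1) / s).toNat
      = (if a + s < b then ((b - (a + s) + s - 1) / s).toNat else 0) + 1 := by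
    have h1 : b - a + s - 1 = (b - a - 1) + 1 * s := by ring
    have h2 : (b - a - 1 + 1 * s) / s = (b - a - 1) / s + 1 :=
      Int.add_mul_ediv_right _ _ (by omega)
    by_cases hc : a + s < b
    · rw [if_pos hc, h1, h2]
      have h3 : b - (a + s) + s - 1 = b - a - 1 := by ring
      rw [h3]
      have : 0 ≤ (b - a - 1) / s := Int.ediv_nonneg (by omega) (by omega)
      omega
    · rw [if_neg hc, h1, h2, Int.ediv_eq_zero_of_lt (by omega) (by omega)]
      simp
  rw [hN, List.range_succ_eq_map]
  simp only [List.map_cons, List.map_map]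
  congr 1
  · simp
  · apply List.map_congr_left
    intro k _
    simp only [Function.comp, Nat.succ_eq_add_one]
    push_cast
    ring

-- The pair A appends at loop index i.
def pvPair (L : List Int) (k0 : Nat) (i : Int) : Int × Int :=
  let chunk := PySem.List.slice L (some i) (some (i + ((k0 + 1 : Nat) : Int)))
  ((PySem.List.pyGet? chunk 0).getD 0, (PySem.List.pyGet? chunk (-1)).getD 0)

theorem pvPair_at (L : List Int) (k0 : Nat) (a : Nat) (x : Int) (t : List Int)
    (hdrop : L.drop a = x :: t) :
    pvPair L k0 ((a : Nat) : Int) = (x, ((t.take k0).getLast?).getD x) := by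
  unfold pvPair
  have hslice : PySem.List.slice L (some (a : Int)) (some ((a : Int) + ((k0 + 1 : Nat) : Int)))
      = (L.drop a).take (k0 + 1) := PySem.List.slice_natCast_add L a (k0 + 1)
  rw [hslice, hdrop]
  simp only [List.take_succ_cons, PySem.List.pyGet?_zero_cons, PySem.List.pyGet?_neg_one,
    List.getLast?_cons, Option.getD_some]

-- A's range/slice loop computes pvChunks.
theorem pvA_loop (k0 : Nat) (L : List Int) :
    ∀ (n a : Nat) (l : List Int), l.length ≤ n → L.drop a = l → ∀ (acc : List (Int × Int)),
      (PySem.List.pyRange (a : Int) (L.length : Int) ((k0 + 1 : Nat) : Int)).foldl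
        (fun ranges i => ranges ++ [pvPair L k0 i]) acc
      = acc ++ pvChunks k0 l := by
  intro n
  induction n with
  | zero =>
    intro a l hl hdrop acc
    have hl0 : l = [] := List.eq_nil_of_length_eq_zero (by omega)
    subst hl0
    have ha : L.length ≤ a := by
      by_contra hlt
      have := congrArg List.length hdrop
      simp [List.length_drop] at this
      omega
    rw [pvRange_pos_nil _ _ _ (by exact_mod_cast Nat.succ_pos k0) (by exact_mod_cast ha)]
    simp [pvChunks_nil]
  | succ m ih =>
    intro a l hl hdrop acc
    cases l with
    | nil =>
      have ha : L.length ≤ a := by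
        by_contra hlt
        have := congrArg List.length hdrop
        simp [List.length_drop] at this
        omega
      rw [pvRange_pos_nil _ _ _ (by exact_mod_cast Nat.succ_pos k0) (by exact_mod_cast ha)]
      simp [pvChunks_nil]
    | cons x t =>
      have ha : a < L.length := by
        by_contra hge
        have : L.drop a = [] := List.drop_eq_nil_of_le (by omega)
        rw [hdrop] at this
        exact absurd this (by simp)
      rw [pvRange_pos_cons _ _ _ (by exact_mod_cast Nat.succ_pos k0) (by exact_mod_cast ha)]
      rw [List.foldl_cons, pvPair_at L k0 a x t hdrop]
      have hcast : ((a : Int) + ((k0 + 1 : Nat) : Int)) = (((a + (k0 + 1) : Nat)) : Int) := by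
        push_cast; ring
      have hdrop' : L.drop (a + (k0 + 1)) = t.drop k0 := by
        rw [← List.drop_drop, hdrop]
        rfl
      rw [hcast, ih (a + (k0 + 1)) (t.drop k0) (by simp at hl ⊢; omega) hdrop']
      rw [pvChunks_cons]
      simp

-- B's step function, abbreviated for the lemmas below (the sp = k0+1 case), and B's final flush.
def pvStep (k0 : Nat) (st : List (Int × Int) × Int × Int × Int) (page : Int) :
    List (Int × Int) × Int × Int × Int :=
  let first := if st.2.1 = 0 then page else st.2.2.1
  let last := page
  let count := st.2.1 + 1
  if count = ((k0 + 1 : Nat) : Int) then (st.1 ++ [(first, last)], 0, first, last)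
  else (st.1, count, first, last)

def pvFlush (st : List (Int × Int) × Int × Int × Int) : List (Int × Int) :=
  if st.2.1 ≠ 0 then st.1 ++ [(st.2.2.1, st.2.2.2)] else st.1

-- Running B's fold through a partial chunk, starting mid-chunk at count j ≥ 1.
theorem pvB_run (k0 : Nat) :
    ∀ (c : List Int) (j : Nat), 1 ≤ j → j ≤ k0 → j + c.length ≤ k0 + 1 →
      ∀ (acc : List (Int × Int)) (f la : Int),
      c.foldl (pvStep k0) (acc, (j : Int), f, la)
        = if j + c.length = k0 + 1
            then (acc ++ [(f, (c.getLast?).getD la)], 0, f, (c.getLast?).getD la)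
            else (acc, ((j + c.length : Nat) : Int), f, (c.getLast?).getD la) := by
  intro c
  induction c with
  | nil =>
    intro j hj hjk hlen acc f la
    rw [if_neg (by simp only [List.length_nil]; omega)]
    simp
  | cons x t ih =>
    intro j hj hjk hlen acc f la
    rw [List.foldl_cons]
    have hstep : pvStep k0 (acc, (j : Int), f, la) x
        = if j = k0 then (acc ++ [(f, x)], 0, f, x) else (acc, (j : Int) + 1, f, x) := by
      have h1 : ¬ j = 0 := by omega
      simp [pvStep, h1]
    by_cases hfull : j = k0
    · have ht : t = [] := by
        simp only [List.length_cons] at hlen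
        exact List.eq_nil_of_length_eq_zero (by omega)
      subst ht
      rw [hstep, if_pos hfull]
      simp only [List.foldl_nil]
      rw [if_pos (by simp only [List.length_cons, List.length_nil]; omega)]
      simp
    · rw [hstep, if_neg hfull]
      have hc : ((j : Int) + 1) = (((j + 1 : Nat)) : Int) := by push_cast; ring
      rw [hc, ih (j + 1) (by omega) (by omega) (by simp only [List.length_cons] at hlen ⊢; omega)]
      simp only [List.length_cons, List.getLast?_cons]
      have harr : j + (t.length + 1) = j + 1 + t.length := by omega
      rw [harr]
      simp

-- B's fold-and-flush computes pvChunks.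
theorem pvB_main (k0 : Nat) :
    ∀ (n : Nat) (l : List Int), l.length ≤ n → ∀ (acc : List (Int × Int)) (f la : Int),
      pvFlush (l.foldl (pvStep k0) (acc, 0, f, la)) = acc ++ pvChunks k0 l := by
  intro n
  induction n with
  | zero =>
    intro l hl acc f la
    have hl0 : l = [] := List.eq_nil_of_length_eq_zero (by omega)
    subst hl0
    simp [pvFlush, pvChunks_nil]
  | succ m ih =>
    intro l hl acc f la
    cases l with
    | nil => simp [pvFlush, pvChunks_nil]
    | cons x t =>
      rw [List.foldl_cons]
      have hstep : pvStep k0 (acc, 0, f, la) x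
          = if k0 = 0 then (acc ++ [(x, x)], 0, x, x) else (acc, 1, x, x) := by
        by_cases h : k0 = 0
        · subst h
          norm_num [pvStep]
        · simp [pvStep, h]
      by_cases hk1 : k0 = 0
      · rw [hstep, if_pos hk1]
        subst hk1
        rw [ih t (by simp only [List.length_cons] at hl; omega) (acc ++ [(x, x)]) x x]
        rw [pvChunks_cons]
        simp
      · rw [hstep, if_neg hk1]
        have hsplit : t = t.take k0 ++ t.drop k0 := (List.take_append_drop k0 t).symm
        conv_lhs => rw [hsplit]
        rw [List.foldl_append]
        have h1 : ((1 : Nat) : Int) = (1 : Int) := by norm_num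
        by_cases hlong : k0 ≤ t.length
        · have hlen : (t.take k0).length = k0 := by simp only [List.length_take]; omega
          have hrun := pvB_run k0 (t.take k0) 1 (by omega) (by omega) (by omega) acc x x
          rw [h1] at hrun
          rw [hrun, if_pos (by omega)]
          rw [ih (t.drop k0) (by simp only [List.length_cons] at hl; simp only [List.length_drop]; omega) _ x _]
          rw [pvChunks_cons]
          simp [List.append_assoc]
        · rw [Nat.not_le] at hlong
          have htake : t.take k0 = t := List.take_of_length_le (by omega)
          have hdropn : t.drop k0 = [] := List.drop_eq_nil_of_le (by omega)
          have hrun := pvB_run k0 (t.take k0) 1 (by omega) (by omega) (by simp only [List.length_take]; omega) acc x x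
          rw [h1] at hrun
          rw [hrun, if_neg (by simp only [List.length_take]; omega)]
          rw [hdropn]
          simp only [List.foldl_nil]
          rw [pvChunks_cons, htake, hdropn]
          simp only [pvFlush, pvChunks_nil]
          rw [if_pos (by push_cast; omega)]

-- ===== VERDICT (by name: the statement is the Claim_ definition above) =====
theorem group_page_ranges_spec : Claim_equal_group_page_ranges := by
  intro pages section_pages _
  unfold Spec_group_page_ranges group_page_ranges group_page_ranges_alt
  have hsp1 : 1 ≤ max 1 section_pages := le_max_left 1 section_pages
  obtain ⟨k0, hk0⟩ : ∃ k0 : Nat, max 1 section_pages = ((k0 + 1 : Nat) : Int) := by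
    refine ⟨(max 1 section_pages - 1).toNat, ?_⟩
    push_cast
    omega
  rw [hk0]
  set l := PySem.List.sorted (PySem.Set.ofList (pages.filter (fun p => 0 < p))) (fun x => x) false with hl
  show (if l = [] then [] else
      (PySem.List.pyRange 0 (l.length : Int) ((k0 + 1 : Nat) : Int)).foldl
        (fun ranges i => ranges ++ [pvPair l k0 i]) [])
    = pvFlush (l.foldl (pvStep k0) ([], 0, 0, 0))
  rw [pvB_main k0 l.length l (le_refl _) [] 0 0]
  by_cases hnil : l = []
  · rw [if_pos hnil, hnil]
    simp [pvChunks_nil]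
  · rw [if_neg hnil]
    have hA := pvA_loop k0 l l.length 0 l (le_refl _) (by simp) []
    simp only [Nat.cast_zero] at hA
    rw [hA]
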